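-- pv_equiv track=rewrite | github.com/seokwns/algorithm | programmers/lv1/가장 많이 받은 선물.py | solution
-- ===== SOURCE A (Python) =====
-- def solution(friends, gifts):
--     answer = 0
--     n = len(friends)
--     table = [[0 for j in range(n)] for i in range(n)]
--
--     idx = {}
--     point = [0 for i in range(n)]
--     for i in range(n):
--         idx[friends[i]] = i
--         point[i] = 0
--
--     for gift in gifts:
--         sp = gift.split(' ')
--         src = sp[0]
--         dst = sp[1]
--         src_idx = idx[src]
--         dst_idx = idx[dst]
--         table[src_idx][dst_idx] += 1
--         point[src_idx] += 1
--         point[dst_idx] -= 1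
--
--     for y in range(n):
--         count = 0
--         for x in range(n):
--             if x == y:
--                 continue
--             give = table[y][x]
--             receive = table[x][y]
--
--             if give > receive:
--                 count += 1
--             elif give == receive:
--                 if point[y] > point[x]:
--                     count += 1
--         if count > answer:
--             answer = count
--
--     return answer
-- ===== SOURCE B (Python) =====
-- def solution(friends, gifts):
--     n = len(friends)
--     idx = {}
--     for i, name in enumerate(friends):
--         idx[name] = i
--     point = [0] * n
--     cnt = {}
--     for gift in gifts:
--         sp = gift.split(' ')
--         s = idx[sp[0]]
--         d = idx[sp[1]]
--         cnt[(s, d)] = cnt.get((s, d), 0) + 1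
--         point[s] += 1
--         point[d] -= 1
--     # rank pass: wins[y] starts as the number of people with strictly fewer points,
--     # computed from one sort instead of an O(n^2) double scan
--     smaller = {}
--     for k, v in enumerate(sorted(point)):
--         if v not in smaller:
--             smaller[v] = k
--     wins = [smaller[p] for p in point]
--     # correction pass over the (sparse) pairs that actually exchanged gifts unevenly:
--     # replace the point-based outcome by the gift-based one
--     for (i, j) in cnt:
--         if i > j and (j, i) in cnt:
--             continue  # the unordered pair is handled at its other key
--         a, b = (i, j) if i < j else (j, i)
--         cab = cnt.get((a, b), 0)
--         cba = cnt.get((b, a), 0)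
--         if cab == cba:
--             continue
--         if point[a] > point[b]:
--             wins[a] -= 1
--         elif point[b] > point[a]:
--             wins[b] -= 1
--         if cab > cba:
--             wins[a] += 1
--         else:
--             wins[b] += 1
--     return max(wins, default=0)
-- ===== Notes on version B (the rewrite author's own statement) =====
-- stated objective: alternative
-- what changed: B never builds the n-by-n table and never runs A's per-person double scan: it counts gifts in a dict keyed by (giver,receiver) index pairs, gets each person's baseline wins as their rank (number of strictly smaller net-point values) obtained from one sort of the point array, and then corrects only the unordered pairs that actually exchanged gifts unevenly, replacing the point-based outcome by the gift-based one.
import Mathlib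
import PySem

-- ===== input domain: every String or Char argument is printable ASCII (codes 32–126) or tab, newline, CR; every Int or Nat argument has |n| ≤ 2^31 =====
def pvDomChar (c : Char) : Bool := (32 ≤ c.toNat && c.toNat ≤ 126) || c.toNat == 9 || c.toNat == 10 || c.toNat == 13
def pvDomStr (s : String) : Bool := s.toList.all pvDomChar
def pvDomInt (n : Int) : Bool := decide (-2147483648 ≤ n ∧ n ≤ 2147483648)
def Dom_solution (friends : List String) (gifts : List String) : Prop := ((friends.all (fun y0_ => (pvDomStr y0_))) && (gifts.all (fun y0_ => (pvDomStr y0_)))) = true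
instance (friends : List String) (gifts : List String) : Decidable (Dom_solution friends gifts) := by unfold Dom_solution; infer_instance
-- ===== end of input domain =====

-- B drops A's n×n matrix and per-person double scan: it counts gifts in a dict keyed by
-- index pairs, gets each person's baseline wins from ONE sort of the point array (rank =
-- number of strictly smaller points), then corrects only the pairs that actually exchanged
-- gifts unevenly (a different algorithm; no speed claim is made).

-- ===== PORT A =====
-- one gift of A's loop: sp = gift.split(' '); table[idx[sp[0]]][idx[sp[1]]] += 1;
-- point[idx[sp[0]]] += 1; point[idx[sp[1]]] -= 1.  none = the Python raises (IndexError/KeyError).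
def aGiftStep (idx : PySem.Dict String Nat) (st : List (List Int) × List Int) (gift : String) :
    Option (List (List Int) × List Int) :=
  let sp := (PySem.Str.split? gift " ").getD []   -- separator is the nonempty literal " ", so split? is never none
  match PySem.List.pyGet? sp 0, PySem.List.pyGet? sp 1 with
  | some src, some dst =>
    match idx.get? src, idx.get? dst with
    | some si, some di =>
        some (st.1.modify si (fun row => row.modify di (· + 1)),
              (st.2.modify si (· + 1)).modify di (· - 1))
    | _, _ => none
  | _, _ => none

-- A's inner 'for x in range(n)' counting loop for person y
def aCount (table : List (List Int)) (point : List Int) (n y : Nat) : Int :=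
  (List.range n).foldl (fun count x =>
    if x = y then count
    else
      if (table.getD y []).getD x 0 > (table.getD x []).getD y 0 then count + 1
      else if (table.getD y []).getD x 0 = (table.getD x []).getD y 0 then
        (if point.getD y 0 > point.getD x 0 then count + 1 else count)
      else count) 0

def solution (friends : List String) (gifts : List String) : Int :=
  let n := friends.length
  let table0 := List.replicate n (List.replicate n (0 : Int))
  -- for i in range(n): idx[friends[i]] = i; point[i] = 0  (point[i] is already 0)
  let idx := (List.range n).foldl (fun d i => d.insert (friends.getD i "") i) PySem.Dict.empty
  let point0 := List.replicate n (0 : Int)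
  match gifts.foldlM (aGiftStep idx) (table0, point0) with
  | none => 0   -- the Python raises here; excluded by Pre_solution
  | some (table, point) =>
      (List.range n).foldl (fun answer y =>
        let count := aCount table point n y
        if count > answer then count else answer) 0

-- ===== PORT B =====
-- one gift of B's loop: cnt[(s,d)] = cnt.get((s,d),0)+1; point[s] += 1; point[d] -= 1
def bGiftStep (idx : PySem.Dict String Nat) (st : PySem.Dict (Nat × Nat) Int × List Int)
    (gift : String) : Option (PySem.Dict (Nat × Nat) Int × List Int) :=
  let sp := (PySem.Str.split? gift " ").getD []   -- separator is the nonempty literal " "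
  match PySem.List.pyGet? sp 0, PySem.List.pyGet? sp 1 with
  | some src, some dst =>
    match idx.get? src, idx.get? dst with
    | some s, some d =>
        some (st.1.insert (s, d) (st.1.getD (s, d) 0 + 1),
              (st.2.modify s (· + 1)).modify d (· - 1))
    | _, _ => none
  | _, _ => none

-- smaller = {}; for k, v in enumerate(sorted(point)): if v not in smaller: smaller[v] = k
def bSmaller (point : List Int) : PySem.Dict Int Int :=
  (PySem.List.sorted point (fun x => x) false).zipIdx.foldl
    (fun d p => if d.contains p.1 then d else d.insert p.1 (p.2 : Int)) PySem.Dict.empty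

-- the body of B's correction loop for one dict key (i, j)
def bFix (cnt : PySem.Dict (Nat × Nat) Int) (point : List Int) (wins : List Int)
    (k : Nat × Nat) : List Int :=
  if k.1 > k.2 ∧ cnt.contains (k.2, k.1) then wins   -- the unordered pair is handled at its other key
  else
    let a := if k.1 < k.2 then k.1 else k.2
    let b := if k.1 < k.2 then k.2 else k.1
    let cab := cnt.getD (a, b) 0
    let cba := cnt.getD (b, a) 0
    if cab = cba then wins
    else
      let wins1 :=
        if point.getD a 0 > point.getD b 0 then wins.modify a (· - 1)
        else if point.getD b 0 > point.getD a 0 then wins.modify b (· - 1)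
        else wins
      if cab > cba then wins1.modify a (· + 1) else wins1.modify b (· + 1)

def solution_alt (friends : List String) (gifts : List String) : Int :=
  let n := friends.length
  let idx := friends.zipIdx.foldl (fun d p => d.insert p.1 p.2) PySem.Dict.empty
  match gifts.foldlM (bGiftStep idx) (PySem.Dict.empty, List.replicate n (0 : Int)) with
  | none => 0   -- the Python raises here; excluded by Pre_solution
  | some (cnt, point) =>
      let smaller := bSmaller point
      -- wins = [smaller[p] for p in point]; every p IS a key of smaller, so getD 0 is exact
      let wins0 := point.map (fun p => smaller.getD p 0)
      let wins := cnt.keys.foldl (bFix cnt point) wins0   -- for (i, j) in cnt: …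
      PySem.List.maxD wins (fun x => x) 0   -- max(wins, default=0)

-- ===== PRECONDITION & SPEC =====
-- Pre_ excludes exactly the inputs on which A raises: a gift without two space-separated
-- fields (IndexError) or naming someone not in friends (KeyError).
def Pre_solution (friends : List String) (gifts : List String) : Prop :=
  ∀ g ∈ gifts, 2 ≤ ((PySem.Str.split? g " ").getD []).length ∧
    ((PySem.Str.split? g " ").getD []).getD 0 "" ∈ friends ∧
    ((PySem.Str.split? g " ").getD []).getD 1 "" ∈ friends
instance (friends : List String) (gifts : List String) : Decidable (Pre_solution friends gifts) := by
  unfold Pre_solution; infer_instance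

def pvWitness_solution : List String × List String :=
  (["muzi", "frodo"], ["muzi frodo", "frodo muzi", "muzi frodo"])

def Spec_solution (friends : List String) (gifts : List String) (out : Int) : Prop := out = solution_alt friends gifts
instance (friends : List String) (gifts : List String) (out : Int) : Decidable (Spec_solution friends gifts out) := by unfold Spec_solution; infer_instance

-- ===== CLAIM (what is proved, stated in full; the proofs are below) =====
def Claim_equal_solution : Prop := ∀ (friends : List String) (gifts : List String), Dom_solution friends gifts → Pre_solution friends gifts → Spec_solution friends gifts (solution friends gifts)

-- ===== LEMMAS AND PROOFS =====

-- the two idx-building folds build the SAME dict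
lemma idx_eq (friends : List String) :
    (List.range friends.length).foldl (fun d i => d.insert (friends.getD i "") i)
      PySem.Dict.empty
    = friends.zipIdx.foldl (fun d p => d.insert p.1 p.2) PySem.Dict.empty := by
  have hz : friends.zipIdx = (List.range friends.length).map (fun i => (friends.getD i "", i)) := by
    apply List.ext_getElem
    · simp
    · intro i h1 h2
      simp at h1 h2
      simp [List.getElem_zipIdx, List.getElem?_eq_getElem h1]
  rw [hz, List.foldl_map]

-- any value stored by the insert fold came from the pair list
lemma get?_foldl_insert_mem (ps : List (String × Nat)) (d : PySem.Dict String Nat)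
    (k : String) (v : Nat)
    (h : (ps.foldl (fun d p => d.insert p.1 p.2) d).get? k = some v) :
    (k, v) ∈ ps ∨ d.get? k = some v := by
  induction ps generalizing d with
  | nil => simp at h; right; exact h
  | cons p ps ih =>
    simp only [List.foldl_cons] at h
    rcases ih _ h with h' | h'
    · left; exact List.mem_cons_of_mem _ h'
    · rw [PySem.Dict.get?_insert] at h'
      by_cases hk : k = p.1
      · simp [hk] at h'
        left; rw [hk, ← h']; exact List.mem_cons_self
      · simp [hk] at h'
        right; exact h'

lemma idx_lt (friends : List String) (k : String) (v : Nat)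
    (h : (friends.zipIdx.foldl (fun d p => d.insert p.1 p.2) PySem.Dict.empty).get? k = some v) :
    v < friends.length := by
  rcases get?_foldl_insert_mem _ _ _ _ h with h' | h'
  · rcases List.mem_zipIdx h' with ⟨_, hv, _⟩
    omega
  · rw [PySem.Dict.get?_empty] at h'
    exact absurd h' (by simp)

lemma idx_mem (friends : List String) (k : String) (hk : k ∈ friends) :
    ∃ v, (friends.zipIdx.foldl (fun d p => d.insert p.1 p.2)
      (PySem.Dict.empty (κ := String) (ν := Nat))).get? k = some v := by
  have hkeys := PySem.Dict.keys_foldl_insert_key friends.zipIdx Prod.fst (fun _ p => p.2)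
    (PySem.Dict.empty (κ := String) (ν := Nat))
  rw [List.zipIdx_map_fst 0 friends] at hkeys
  have hkmem : k ∈ (friends.zipIdx.foldl (fun d p => d.insert p.1 p.2)
      (PySem.Dict.empty (κ := String) (ν := Nat))).keys := by
    rw [hkeys]
    simp only [PySem.Dict.keys_empty, PySem.Set.update_nil_left, PySem.Set.mem_ofList]
    exact hk
  have hc := (PySem.Dict.contains_iff_mem_keys _ _).mpr hkmem
  rw [PySem.Dict.contains_eq_isSome_get?] at hc
  exact Option.isSome_iff_exists.mp hc

def Shape (n : Nat) (t : List (List Int)) : Prop :=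
  t.length = n ∧ ∀ row ∈ t, row.length = n

lemma shape_modify (n : Nat) (t : List (List Int)) (ht : Shape n t) (si di : Nat) :
    Shape n (t.modify si (fun row => row.modify di (· + 1))) := by
  obtain ⟨h1, h2⟩ := ht
  refine ⟨by simpa using h1, ?_⟩
  intro row hrow
  obtain ⟨j, hj, rfl⟩ := List.mem_iff_getElem.mp hrow
  rw [List.getElem_modify]
  split
  · simp [h2 _ (List.getElem_mem _)]
  · exact h2 _ (List.getElem_mem _)

-- getD through a single in-range modify
lemma getD_modify_lt (l : List Int) (i y : Nat) (f : Int → Int) (hi : i < l.length) :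
    (l.modify i f).getD y 0 = if i = y then f (l.getD y 0) else l.getD y 0 := by
  by_cases hy : y < l.length
  · rw [List.getD_eq_getElem _ _ (by simpa [List.length_modify] using hy),
      List.getElem_modify, List.getD_eq_getElem _ _ hy]
  · rw [List.getD_eq_default _ _ (by simpa [List.length_modify] using hy),
      List.getD_eq_default _ _ (by omega), if_neg (by omega)]

-- the table entry after one gift update
lemma tbl_modify_getD (n : Nat) (t : List (List Int)) (ht : Shape n t)
    (si di y x : Nat) (_hsi : si < n) (hdi : di < n) (hy : y < n) (_hx : x < n) :
    ((t.modify si (fun row => row.modify di (· + 1))).getD y []).getD x 0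
      = (t.getD y []).getD x 0 + (if y = si ∧ x = di then 1 else 0) := by
  obtain ⟨hlen, hrows⟩ := ht
  have hrl : (t[y]'(hlen ▸ hy)).length = n := hrows _ (List.getElem_mem _)
  have houter : (t.modify si (fun row => row.modify di (· + 1))).getD y []
      = if si = y then (t[y]'(hlen ▸ hy)).modify di (· + 1) else t[y]'(hlen ▸ hy) := by
    rw [List.getD_eq_getElem _ _ (by simp [List.length_modify]; omega), List.getElem_modify]
  rw [houter, List.getD_eq_getElem t [] (hlen ▸ hy)]
  by_cases hys : si = y
  · rw [if_pos hys, getD_modify_lt _ _ _ _ (by rw [hrl]; exact hdi)]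
    split_ifs <;> omega
  · rw [if_neg hys, if_neg (by tauto)]
    ring

-- the two gift folds succeed together; B's dict holds exactly A's table entries,
-- and the point lists stay literally equal
lemma fold_both (friends : List String) (n : Nat)
    (idx : PySem.Dict String Nat)
    (hlt : ∀ k v, idx.get? k = some v → v < n)
    (hmem : ∀ k ∈ friends, ∃ v, idx.get? k = some v) :
    ∀ (gifts : List String) (t : List (List Int)) (cnt : PySem.Dict (Nat × Nat) Int)
      (point : List Int),
      Pre_solution friends gifts → Shape n t → point.length = n →
      cnt.keys.Nodup → (∀ k ∈ cnt.keys, k.1 < n ∧ k.2 < n) →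
      (∀ y x, y < n → x < n → (t.getD y []).getD x 0 = cnt.getD (y, x) 0) →
      ∃ t' cnt' point',
        gifts.foldlM (bGiftStep idx) (cnt, point) = some (cnt', point') ∧
        gifts.foldlM (aGiftStep idx) (t, point) = some (t', point') ∧
        Shape n t' ∧ point'.length = n ∧ cnt'.keys.Nodup ∧
        (∀ k ∈ cnt'.keys, k.1 < n ∧ k.2 < n) ∧
        (∀ y x, y < n → x < n → (t'.getD y []).getD x 0 = cnt'.getD (y, x) 0) := by
  intro gifts
  induction gifts with
  | nil =>
    intro t cnt point _ ht hpl hnd hbk hrel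
    exact ⟨t, cnt, point, rfl, rfl, ht, hpl, hnd, hbk, hrel⟩
  | cons g gifts ih =>
    intro t cnt point hpre ht hpl hnd hbk hrel
    obtain ⟨hsp, hsrc, hdst⟩ := hpre g List.mem_cons_self
    set sp := (PySem.Str.split? g " ").getD [] with hspdef
    have h0 : PySem.List.pyGet? sp 0 = some (sp.getD 0 "") := by
      rw [PySem.List.pyGet?_zero, List.getElem?_eq_getElem (by omega),
        List.getD_eq_getElem _ _ (by omega)]
    have h1 : PySem.List.pyGet? sp 1 = some (sp.getD 1 "") := by
      rw [show (1 : Int) = ((1 : Nat) : Int) by norm_num, PySem.List.pyGet?_natCast,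
        List.getElem?_eq_getElem (by omega), List.getD_eq_getElem _ _ (by omega)]
    obtain ⟨si, hsi⟩ := hmem _ hsrc
    obtain ⟨di, hdi⟩ := hmem _ hdst
    have hsin : si < n := hlt _ _ hsi
    have hdin : di < n := hlt _ _ hdi
    have hstepA : aGiftStep idx (t, point) g
        = some (t.modify si (fun row => row.modify di (· + 1)),
            (point.modify si (· + 1)).modify di (· - 1)) := by
      unfold aGiftStep
      rw [← hspdef]
      simp only [h0, h1, hsi, hdi]
    have hstepB : bGiftStep idx (cnt, point) g
        = some (cnt.insert (si, di) (cnt.getD (si, di) 0 + 1),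
            (point.modify si (· + 1)).modify di (· - 1)) := by
      unfold bGiftStep
      rw [← hspdef]
      simp only [h0, h1, hsi, hdi]
    have hrel' : ∀ y x, y < n → x < n →
        ((t.modify si (fun row => row.modify di (· + 1))).getD y []).getD x 0
          = (cnt.insert (si, di) (cnt.getD (si, di) 0 + 1)).getD (y, x) 0 := by
      intro y x hy hx
      rw [tbl_modify_getD n t ht si di y x hsin hdin hy hx, PySem.Dict.getD_insert,
        hrel y x hy hx]
      by_cases hk : (y, x) = (si, di)
      · rw [if_pos hk, Prod.mk.injEq] at *
        rw [if_pos ⟨hk.1, hk.2⟩]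
        rw [hk.1, hk.2]
      · rw [if_neg hk, if_neg (fun h => hk (by rw [Prod.mk.injEq]; exact h))]
        ring
    obtain ⟨t', cnt', point', hB, hA, ht', hpl', hnd', hbk', hrelf⟩ :=
      ih (t.modify si (fun row => row.modify di (· + 1)))
        (cnt.insert (si, di) (cnt.getD (si, di) 0 + 1))
        ((point.modify si (· + 1)).modify di (· - 1))
        (fun g' hg' => hpre g' (List.mem_cons_of_mem _ hg'))
        (shape_modify n t ht si di)
        (by simp [List.length_modify, hpl])
        (PySem.Dict.nodup_keys_insert _ _ _ hnd)
        (fun k hk => by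
          rcases (PySem.Dict.mem_keys_insert _ _ _ _).mp hk with h | h
          · rw [h]; exact ⟨hsin, hdin⟩
          · exact hbk k h)
        hrel'
    refine ⟨t', cnt', point', ?_, ?_, ht', hpl', hnd', hbk', hrelf⟩
    · rw [List.foldlM_cons, hstepB]
      exact hB
    · rw [List.foldlM_cons, hstepA]
      exact hA

-- first-wins insertion: lookup in the fold is the FIRST matching pair of the list
lemma firstWins (l : List (Int × Nat)) (d : PySem.Dict Int Int) (k : Int) :
    (l.foldl (fun d p => if d.contains p.1 then d else d.insert p.1 ((p.2 : Int))) d).get? k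
      = ((d.get? k).orElse (fun _ => (l.find? (fun p => p.1 == k)).map (fun p => (p.2 : Int)))) := by
  induction l generalizing d with
  | nil => cases hd : d.get? k <;> simp [hd]
  | cons p l ih =>
    rw [List.foldl_cons]
    by_cases hc : d.contains p.1 = true
    · rw [if_pos hc, ih]
      by_cases hpk : p.1 = k
      · rw [hpk] at hc
        obtain ⟨v, hv⟩ := Option.isSome_iff_exists.mp
          (show (d.get? k).isSome by rw [← PySem.Dict.contains_eq_isSome_get?]; exact hc)
        rw [hv]
        simp
      · simp only [List.find?_cons, show (p.1 == k) = false from beq_eq_false_iff_ne.mpr hpk]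
    · rw [if_neg hc, ih]
      have hdnone : d.get? p.1 = none := by
        have := PySem.Dict.contains_eq_isSome_get? d p.1
        rw [Bool.not_eq_true] at hc
        rw [hc] at this
        exact Option.not_isSome_iff_eq_none.mp (by rw [← this]; simp)
      by_cases hpk : p.1 = k
      · subst hpk
        rw [PySem.Dict.get?_insert_self, hdnone]
        simp
      · rw [PySem.Dict.get?_insert, if_neg (fun h => hpk h.symm)]
        simp only [show (p.1 == k) = false from beq_eq_false_iff_ne.mpr hpk, List.find?_cons]

-- in a non-decreasing list, the first index of a value v is the number of elements < v
lemma find_zipIdx_sorted (v : Int) :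
    ∀ (s : List Int) (k : Nat), s.Pairwise (· ≤ ·) → v ∈ s →
      (s.zipIdx k).find? (fun p => p.1 == v)
        = some (v, k + s.countP (fun q => decide (q < v))) := by
  intro s
  induction s with
  | nil => intro k _ hv; simp at hv
  | cons a t ih =>
    intro k hp hv
    have ha : ∀ b ∈ t, a ≤ b := fun b hb => (List.pairwise_cons.mp hp).1 b hb
    have hpt : t.Pairwise (· ≤ ·) := (List.pairwise_cons.mp hp).2
    rw [List.zipIdx_cons, List.find?_cons]
    by_cases hav : a = v
    · subst hav
      have hct : t.countP (fun q => decide (q < a)) = 0 :=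
        List.countP_eq_zero.mpr (fun q hq => by
          simp only [decide_eq_true_eq, not_lt]
          exact ha q hq)
      simp [hct]
    · have hvt : v ∈ t := by
        rcases List.mem_cons.mp hv with h | h
        · exact absurd h.symm hav
        · exact h
      have hlt : a < v := lt_of_le_of_ne (ha v hvt) hav
      rw [show ((a, k).1 == v) = false from beq_eq_false_iff_ne.mpr hav, ih (k + 1) hpt hvt]
      rw [List.countP_cons, show (decide (a < v)) = true from decide_eq_true hlt]
      refine congrArg some (Prod.ext rfl ?_)
      norm_num
      omega

-- the rank dict maps each point value to the number of strictly smaller points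
lemma bSmaller_getD (point : List Int) (v : Int) (hv : v ∈ point) :
    (bSmaller point).getD v 0 = (point.countP (fun q => decide (q < v)) : Int) := by
  unfold bSmaller
  rw [PySem.Dict.getD_eq_get?_getD, firstWins, PySem.Dict.get?_empty]
  have hvs : v ∈ PySem.List.sorted point (fun x => x) false :=
    (PySem.List.mem_sorted _ _ _ _).mpr hv
  rw [find_zipIdx_sorted v _ 0 (PySem.List.sorted_pairwise point (fun x => x)) hvs]
  have hperm := PySem.List.sorted_perm point (fun x => x) false
  rw [hperm.countP_eq]
  simp

-- what one correction step adds at index y (proof-side mirror of bFix)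
def delta (cnt : PySem.Dict (Nat × Nat) Int) (point : List Int) (y : Nat)
    (k : Nat × Nat) : Int :=
  if k.1 > k.2 ∧ cnt.contains (k.2, k.1) then 0
  else
    let a := if k.1 < k.2 then k.1 else k.2
    let b := if k.1 < k.2 then k.2 else k.1
    let cab := cnt.getD (a, b) 0
    let cba := cnt.getD (b, a) 0
    if cab = cba then 0
    else
      (if cab > cba then (if a = y then (1 : Int) else 0) else (if b = y then 1 else 0))
      - (if point.getD a 0 > point.getD b 0 then (if a = y then (1 : Int) else 0)
         else if point.getD b 0 > point.getD a 0 then (if b = y then 1 else 0) else 0)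

-- the net effect of an unordered pair (a, b), a < b
def Dterm (cnt : PySem.Dict (Nat × Nat) Int) (point : List Int) (y : Nat)
    (p : Nat × Nat) : Int :=
  let cab := cnt.getD (p.1, p.2) 0
  let cba := cnt.getD (p.2, p.1) 0
  if cab = cba then 0
  else
    (if cab > cba then (if p.1 = y then (1 : Int) else 0) else (if p.2 = y then 1 else 0))
    - (if point.getD p.1 0 > point.getD p.2 0 then (if p.1 = y then (1 : Int) else 0)
       else if point.getD p.2 0 > point.getD p.1 0 then (if p.2 = y then 1 else 0) else 0)

lemma bFix_length (cnt : PySem.Dict (Nat × Nat) Int) (point : List Int) (wins : List Int)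
    (k : Nat × Nat) : (bFix cnt point wins k).length = wins.length := by
  unfold bFix
  dsimp only
  split_ifs <;> simp [List.length_modify]

lemma bFix_getD (cnt : PySem.Dict (Nat × Nat) Int) (point : List Int) (wins : List Int)
    (k : Nat × Nat) (y : Nat) (h1 : k.1 < wins.length) (h2 : k.2 < wins.length) :
    (bFix cnt point wins k).getD y 0 = wins.getD y 0 + delta cnt point y k := by
  obtain ⟨i, j⟩ := k
  dsimp only at h1 h2
  unfold bFix delta
  dsimp only
  by_cases hgt : i > j ∧ cnt.contains (j, i) = true
  · rw [if_pos hgt, if_pos hgt]; ring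
  · rw [if_neg hgt, if_neg hgt]
    set a := if i < j then i else j with hadef
    set b := if i < j then j else i with hbdef
    have ha : a < wins.length := by rw [hadef]; split <;> assumption
    have hb : b < wins.length := by rw [hbdef]; split <;> assumption
    by_cases hc : cnt.getD (a, b) 0 = cnt.getD (b, a) 0
    · rw [if_pos hc, if_pos hc]; ring
    · rw [if_neg hc, if_neg hc]
      have e_aa := getD_modify_lt (wins.modify a (· - 1)) a y (· + 1)
        (by rw [List.length_modify]; exact ha)
      have e_ab := getD_modify_lt (wins.modify a (· - 1)) b y (· + 1)
        (by rw [List.length_modify]; exact hb)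
      have e_ba := getD_modify_lt (wins.modify b (· - 1)) a y (· + 1)
        (by rw [List.length_modify]; exact ha)
      have e_bb := getD_modify_lt (wins.modify b (· - 1)) b y (· + 1)
        (by rw [List.length_modify]; exact hb)
      have e_a := getD_modify_lt wins a y (· - 1) ha
      have e_b := getD_modify_lt wins b y (· - 1) hb
      have e_pa := getD_modify_lt wins a y (· + 1) ha
      have e_pb := getD_modify_lt wins b y (· + 1) hb
      by_cases hp1 : point.getD b 0 < point.getD a 0
      · rw [if_pos hp1, if_pos hp1]
        by_cases hcb : cnt.getD (b, a) 0 < cnt.getD (a, b) 0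
        · rw [if_pos hcb, if_pos hcb, e_aa, e_a]
          split_ifs <;> (try beta_reduce) <;> omega
        · rw [if_neg hcb, if_neg hcb, e_ab, e_a]
          split_ifs <;> (try beta_reduce) <;> omega
      · rw [if_neg hp1, if_neg hp1]
        by_cases hp2 : point.getD a 0 < point.getD b 0
        · rw [if_pos hp2, if_pos hp2]
          by_cases hcb : cnt.getD (b, a) 0 < cnt.getD (a, b) 0
          · rw [if_pos hcb, if_pos hcb, e_ba, e_b]
            split_ifs <;> (try beta_reduce) <;> omega
          · rw [if_neg hcb, if_neg hcb, e_bb, e_b]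
            split_ifs <;> (try beta_reduce) <;> omega
        · rw [if_neg hp2, if_neg hp2]
          by_cases hcb : cnt.getD (b, a) 0 < cnt.getD (a, b) 0
          · rw [if_pos hcb, if_pos hcb, e_pa]
            split_ifs <;> (try beta_reduce) <;> omega
          · rw [if_neg hcb, if_neg hcb, e_pb]
            split_ifs <;> (try beta_reduce) <;> omega

lemma foldl_bFix_getD (cnt : PySem.Dict (Nat × Nat) Int) (point : List Int) (y : Nat) :
    ∀ (ks : List (Nat × Nat)) (wins : List Int),
      (∀ k ∈ ks, k.1 < wins.length ∧ k.2 < wins.length) →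
      (ks.foldl (bFix cnt point) wins).getD y 0
        = wins.getD y 0 + (ks.map (delta cnt point y)).sum := by
  intro ks
  induction ks with
  | nil => intro wins _; simp
  | cons k ks ih =>
    intro wins h
    have hk := h k List.mem_cons_self
    rw [List.foldl_cons, ih _ (fun k' hk' => by
        rw [bFix_length]; exact h k' (List.mem_cons_of_mem _ hk')),
      bFix_getD _ _ _ _ _ hk.1 hk.2, List.map_cons, List.sum_cons]
    ring

-- sum over a Nodup list of a single-spike function
lemma sum_map_ite_eq {α : Type} [DecidableEq α] (l : List α) (hl : l.Nodup) (c : α)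
    (v : α → Int) :
    (l.map (fun x => if x = c then v x else 0)).sum = if c ∈ l then v c else 0 := by
  induction l with
  | nil => simp
  | cons a l ih =>
    rcases List.nodup_cons.mp hl with ⟨hna, hnd⟩
    rw [List.map_cons, List.sum_cons, ih hnd]
    by_cases hac : a = c
    · subst hac
      simp [hna]
    · simp [hac, Ne.symm hac]

-- sum over fibers of a normalisation map
lemma sum_fiber {κ π : Type} [DecidableEq π] (norm : κ → π) (f : κ → Int)
    (P : List π) (hP : P.Nodup) :
    ∀ (l : List κ), (∀ k ∈ l, f k ≠ 0 → norm k ∈ P) →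
      (l.map f).sum
        = (P.map (fun p => ((l.filter (fun k => norm k = p)).map f).sum)).sum := by
  intro l
  induction l with
  | nil => intro _; simp
  | cons k l ih =>
    intro h
    rw [List.map_cons, List.sum_cons, ih (fun k' hk' => h k' (List.mem_cons_of_mem _ hk'))]
    have hfib : P.map (fun p => (((k :: l).filter (fun k' => norm k' = p)).map f).sum)
        = P.map (fun p => ((l.filter (fun k' => norm k' = p)).map f).sum
            + (if p = norm k then f k else 0)) := by
      apply List.map_congr_left
      intro p _
      rw [List.filter_cons]
      by_cases hnk : norm k = p
      · rw [if_pos (by simp [hnk]), List.map_cons, List.sum_cons, if_pos hnk.symm]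
        ring
      · rw [if_neg (by simp [hnk]), if_neg (fun h' => hnk h'.symm)]
        ring
    rw [hfib, PySem.List.sum_map_add_int, sum_map_ite_eq P hP (norm k) (fun _ => f k)]
    by_cases hm : norm k ∈ P
    · rw [if_pos hm]; ring
    · rw [if_neg hm]
      by_cases hz : f k = 0
      · rw [hz]; ring
      · exact absurd (h k List.mem_cons_self hz) hm

lemma ite_mem_cons {α : Type} [DecidableEq α] (x a : α) (l : List α) (h : x ≠ a) (c : Int) :
    (if x ∈ a :: l then c else 0) = (if x ∈ l then c else 0) := by
  by_cases hx : x ∈ l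
  · rw [if_pos hx, if_pos (List.mem_cons_of_mem _ hx)]
  · rw [if_neg hx, if_neg (fun hm => by
      rcases List.mem_cons.mp hm with h' | h'
      · exact h h'
      · exact hx h')]

-- a filter that can only keep two distinct values, over a Nodup list
lemma sum_filter_two {κ : Type} [DecidableEq κ] (u v : κ) (huv : u ≠ v) (f : κ → Int) :
    ∀ (l : List κ), l.Nodup →
      ((l.filter (fun k => k = u ∨ k = v)).map f).sum
        = (if u ∈ l then f u else 0) + (if v ∈ l then f v else 0) := by
  intro l
  induction l with
  | nil => intro _; simp
  | cons a l ih =>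
    intro hl
    rcases List.nodup_cons.mp hl with ⟨hna, hnd⟩
    rw [List.filter_cons]
    by_cases hau : a = u
    · subst hau
      rw [if_pos (by simp), List.map_cons, List.sum_cons, ih hnd,
        if_neg hna, if_pos List.mem_cons_self,
        ite_mem_cons v a l (fun h' => huv h'.symm) (f v)]
      ring
    · by_cases hav : a = v
      · subst hav
        rw [if_pos (by simp), List.map_cons, List.sum_cons, ih hnd,
          if_neg hna, if_pos List.mem_cons_self,
          ite_mem_cons u a l (fun h' => huv (h'.symm ▸ rfl)) (f u)]
        ring
      · rw [if_neg (by simp [hau, hav]), ih hnd,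
          ite_mem_cons u a l (fun h' => hau h'.symm) (f u),
          ite_mem_cons v a l (fun h' => hav h'.symm) (f v)]

def normPair (k : Nat × Nat) : Nat × Nat := if k.1 < k.2 then k else (k.2, k.1)

lemma normPair_eq_iff (a b : Nat) (hab : a < b) (k : Nat × Nat) :
    normPair k = (a, b) ↔ k = (a, b) ∨ k = (b, a) := by
  unfold normPair
  constructor
  · intro h
    split_ifs at h with hk
    · left; exact h
    · right
      have h1 : k.2 = a := congrArg Prod.fst h
      have h2 : k.1 = b := congrArg Prod.snd h
      exact Prod.ext h2 h1
  · rintro (rfl | rfl)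
    · rw [if_pos hab]
    · dsimp only
      rw [if_neg (by omega)]

def pairList (n : Nat) : List (Nat × Nat) :=
  (List.range n).flatMap (fun i => (List.range' (i + 1) (n - (i + 1))).map (fun j => (i, j)))

lemma mem_pairList (n : Nat) (p : Nat × Nat) :
    p ∈ pairList n ↔ p.1 < p.2 ∧ p.2 < n := by
  obtain ⟨i, j⟩ := p
  simp only [pairList, List.mem_flatMap, List.mem_map, List.mem_range, Prod.mk.injEq]
  constructor
  · rintro ⟨a, ha, b, hb, rfl, rfl⟩
    rcases List.mem_range'_1.mp hb with ⟨h1, h2⟩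
    constructor <;> omega
  · rintro ⟨h1, h2⟩
    exact ⟨i, by omega, j, List.mem_range'_1.mpr ⟨by omega, by omega⟩, rfl, rfl⟩

lemma pairList_nodup (n : Nat) : (pairList n).Nodup := by
  unfold pairList
  rw [List.nodup_flatMap]
  constructor
  · intro i _
    exact (List.nodup_range' 1).map (fun a b h => by simpa using congrArg Prod.snd h)
  · have : ∀ i j : Nat, i ≠ j → Function.onFun List.Disjoint
        (fun i => (List.range' (i + 1) (n - (i + 1))).map (fun j => (i, j))) i j := by
      intro i j hij p hpi hpj
      simp only [List.mem_map] at hpi hpj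
      obtain ⟨a, _, rfl⟩ := hpi
      obtain ⟨b, _, h⟩ := hpj
      exact hij (congrArg Prod.fst h).symm
    exact (List.nodup_range).pairwise_of_forall_ne (fun i _ j _ h => this i j h)

lemma delta_self (cnt : PySem.Dict (Nat × Nat) Int) (point : List Int) (y : Nat)
    (k : Nat × Nat) (hk : k.1 = k.2) : delta cnt point y k = 0 := by
  obtain ⟨i, j⟩ := k
  dsimp only at hk
  subst hk
  unfold delta
  simp

lemma delta_eq_Dterm_lo (cnt : PySem.Dict (Nat × Nat) Int) (point : List Int) (y : Nat)
    (a b : Nat) (hab : a < b) :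
    delta cnt point y (a, b) = Dterm cnt point y (a, b) := by
  unfold delta Dterm
  dsimp only
  rw [if_neg (fun h => absurd h.1 (by omega)), if_pos hab, if_pos hab]

lemma delta_eq_Dterm_hi (cnt : PySem.Dict (Nat × Nat) Int) (point : List Int) (y : Nat)
    (a b : Nat) (hab : a < b) :
    delta cnt point y (b, a)
      = if cnt.contains (a, b) = true then 0 else Dterm cnt point y (a, b) := by
  unfold delta Dterm
  dsimp only
  have hba : ¬ b < a := by omega
  by_cases hc : cnt.contains (a, b) = true
  · rw [if_pos ⟨hab, hc⟩, if_pos hc]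
  · rw [if_neg (fun h => hc h.2), if_neg hc]
    simp only [hba, if_false]

-- the whole correction pass sums to the Dterm of every unordered pair
lemma keys_sum_eq_pair_sum (cnt : PySem.Dict (Nat × Nat) Int) (point : List Int)
    (n y : Nat) (hnd : cnt.keys.Nodup) (hb : ∀ k ∈ cnt.keys, k.1 < n ∧ k.2 < n) :
    (cnt.keys.map (delta cnt point y)).sum
      = ((pairList n).map (Dterm cnt point y)).sum := by
  rw [sum_fiber normPair (delta cnt point y) (pairList n) (pairList_nodup n) cnt.keys
    (fun k hk hne => by
      obtain ⟨hk1, hk2⟩ := hb k hk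
      have hne12 : k.1 ≠ k.2 := fun h => hne (delta_self cnt point y k h)
      rw [mem_pairList]
      unfold normPair
      split_ifs with hlt
      · exact ⟨hlt, hk2⟩
      · exact ⟨by omega, hk1⟩)]
  refine congrArg List.sum (List.map_congr_left ?_)
  intro p hp
  obtain ⟨hab, hbn⟩ := (mem_pairList n p).mp hp
  obtain ⟨a, b⟩ := p
  dsimp only at hab hbn
  rw [List.filter_congr (fun k _ =>
    decide_eq_decide.mpr (normPair_eq_iff a b hab k))]
  rw [sum_filter_two (a, b) (b, a) (by intro h; rw [Prod.mk.injEq] at h; omega)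
    (delta cnt point y) cnt.keys hnd]
  by_cases h1 : (a, b) ∈ cnt.keys
  · have hc1 : cnt.contains (a, b) = true := (PySem.Dict.contains_iff_mem_keys _ _).mpr h1
    rw [if_pos h1, delta_eq_Dterm_lo cnt point y a b hab]
    by_cases h2 : (b, a) ∈ cnt.keys
    · rw [if_pos h2, delta_eq_Dterm_hi cnt point y a b hab, if_pos hc1]
      ring
    · rw [if_neg h2]
      ring
  · have hc1 : cnt.contains (a, b) = false :=
      Bool.eq_false_iff.mpr (fun h => h1 ((PySem.Dict.contains_iff_mem_keys _ _).mp h))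
    rw [if_neg h1]
    by_cases h2 : (b, a) ∈ cnt.keys
    · rw [if_pos h2, delta_eq_Dterm_hi cnt point y a b hab, if_neg (by rw [hc1]; simp)]
      ring
    · rw [if_neg h2]
      have hc2 : cnt.contains (b, a) = false :=
        Bool.eq_false_iff.mpr (fun h => h2 ((PySem.Dict.contains_iff_mem_keys _ _).mp h))
      unfold Dterm
      dsimp only
      rw [PySem.Dict.getD_of_not_contains _ _ hc1, PySem.Dict.getD_of_not_contains _ _ hc2,
        if_pos rfl]
      ring

lemma sum_flatMap_int {α : Type} (l : List α) (g : α → List Int) :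
    (l.flatMap g).sum = (l.map (fun a => (g a).sum)).sum := by
  induction l with
  | nil => simp
  | cons a l ih => simp [List.flatMap_cons, List.sum_append, ih]

lemma Dterm_none (cnt : PySem.Dict (Nat × Nat) Int) (point : List Int) (y : Nat)
    (p : Nat × Nat) (h1 : p.1 ≠ y) (h2 : p.2 ≠ y) : Dterm cnt point y p = 0 := by
  unfold Dterm
  dsimp only
  split_ifs <;> omega

lemma Dterm_fst (cnt : PySem.Dict (Nat × Nat) Int) (point : List Int) (y x : Nat)
    (hx : x ≠ y) :
    Dterm cnt point y (y, x)
      = if cnt.getD (y, x) 0 = cnt.getD (x, y) 0 then 0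
        else (if cnt.getD (y, x) 0 > cnt.getD (x, y) 0 then (1 : Int) else 0)
          - (if point.getD y 0 > point.getD x 0 then (1 : Int) else 0) := by
  unfold Dterm
  dsimp only
  split_ifs <;> omega

lemma Dterm_snd (cnt : PySem.Dict (Nat × Nat) Int) (point : List Int) (y x : Nat)
    (hx : x ≠ y) :
    Dterm cnt point y (x, y)
      = if cnt.getD (y, x) 0 = cnt.getD (x, y) 0 then 0
        else (if cnt.getD (y, x) 0 > cnt.getD (x, y) 0 then (1 : Int) else 0)
          - (if point.getD y 0 > point.getD x 0 then (1 : Int) else 0) := by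
  unfold Dterm
  dsimp only
  split_ifs <;> omega

-- the pair sum regrouped per opponent of y
lemma pair_sum_eq_range_sum (cnt : PySem.Dict (Nat × Nat) Int) (point : List Int)
    (n y : Nat) (hy : y < n) :
    ((pairList n).map (Dterm cnt point y)).sum
      = ((List.range n).map (fun x =>
          if x = y then 0
          else if cnt.getD (y, x) 0 = cnt.getD (x, y) 0 then 0
          else (if cnt.getD (y, x) 0 > cnt.getD (x, y) 0 then (1 : Int) else 0)
            - (if point.getD y 0 > point.getD x 0 then (1 : Int) else 0))).sum := by
  have hsplit : List.range n = List.range' 0 y ++ y :: List.range' (y + 1) (n - (y + 1)) := by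
    rw [List.range_eq_range']
    have h1 : List.range' 0 y ++ List.range' y (n - y) = List.range' 0 n := by
      have := List.range'_append (s := 0) (m := y) (n := n - y) (step := 1)
      simpa [Nat.add_sub_cancel' (le_of_lt hy)] using this
    have h2 : List.range' y (n - y) = y :: List.range' (y + 1) (n - (y + 1)) := by
      have hny : n - y = (n - (y + 1)) + 1 := by omega
      rw [hny, List.range'_succ]
    rw [← h1, h2]
  set hfun : Nat → Int := fun x =>
    if x = y then 0
    else if cnt.getD (y, x) 0 = cnt.getD (x, y) 0 then 0
    else (if cnt.getD (y, x) 0 > cnt.getD (x, y) 0 then (1 : Int) else 0)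
      - (if point.getD y 0 > point.getD x 0 then (1 : Int) else 0) with hfdef
  have hinner : ∀ i, (((List.range' (i + 1) (n - (i + 1))).map (fun j => (i, j))).map
      (Dterm cnt point y)).sum
      = ((List.range' (i + 1) (n - (i + 1))).map (fun j => Dterm cnt point y (i, j))).sum := by
    intro i
    rw [List.map_map]
    rfl
  unfold pairList
  rw [List.map_flatMap, sum_flatMap_int, hsplit, List.map_append, List.sum_append,
    List.map_cons, List.sum_cons, List.map_append, List.sum_append, List.map_cons,
    List.sum_cons]
  have hA : (List.range' 0 y).map (fun i =>
        (((List.range' (i + 1) (n - (i + 1))).map (fun j => (i, j))).map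
          (Dterm cnt point y)).sum)
      = (List.range' 0 y).map hfun := by
    apply List.map_congr_left
    intro i hi
    rcases List.mem_range'_1.mp hi with ⟨_, hiy⟩
    simp only [Nat.zero_add] at hiy
    rw [hinner i,
      List.map_congr_left (g := fun j => if j = y then Dterm cnt point y (i, y) else 0)
        (fun j hj => by
          rcases List.mem_range'_1.mp hj with ⟨hj1, _⟩
          dsimp only
          by_cases hjy : j = y
          · subst hjy
            rw [if_pos rfl]
          · rw [if_neg hjy, Dterm_none cnt point y (i, j) (by omega) (by simpa using hjy)]),
      sum_map_ite_eq _ (List.nodup_range' (step := 1)) y (fun _ => Dterm cnt point y (i, y)),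
      if_pos (show y ∈ List.range' (i + 1) (n - (i + 1)) from
        List.mem_range'_1.mpr ⟨by omega, by omega⟩),
      Dterm_snd cnt point y i (show i ≠ y by omega), hfdef]
    dsimp only
    rw [if_neg (show ¬ i = y by omega)]
  have hM : (((List.range' (y + 1) (n - (y + 1))).map (fun j => (y, j))).map
        (Dterm cnt point y)).sum
      = ((List.range' (y + 1) (n - (y + 1))).map hfun).sum := by
    rw [hinner y]
    apply congrArg List.sum
    apply List.map_congr_left
    intro j hj
    rcases List.mem_range'_1.mp hj with ⟨hj1, _⟩
    rw [Dterm_fst cnt point y j (show j ≠ y by omega), hfdef]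
    dsimp only
    rw [if_neg (show ¬ j = y by omega)]
  have hT : ((List.range' (y + 1) (n - (y + 1))).map (fun i =>
        (((List.range' (i + 1) (n - (i + 1))).map (fun j => (i, j))).map
          (Dterm cnt point y)).sum)).sum = 0 := by
    rw [List.map_congr_left (g := fun _ => (0 : Int)) (fun i hi => by
      rcases List.mem_range'_1.mp hi with ⟨hi1, _⟩
      rw [hinner i,
        List.map_congr_left (g := fun _ => (0 : Int)) (fun j hj => by
          rcases List.mem_range'_1.mp hj with ⟨hj1, _⟩
          exact Dterm_none cnt point y (i, j) (by omega) (by omega))]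
      simp)]
    simp
  have hMR : hfun y = 0 := by
    simp [hfdef]
  rw [hA, hM, hT]
  have hy0 : hfun y = 0 := hMR
  rw [hy0]
  ring

-- "y beats x": strictly more gifts given, or tie with strictly more points
def beatsB (t : List (List Int)) (p : List Int) (y x : Nat) : Bool :=
  decide ((t.getD x []).getD y 0 < (t.getD y []).getD x 0) ||
    (decide ((t.getD y []).getD x 0 = (t.getD x []).getD y 0) && decide (p.getD x 0 < p.getD y 0))

lemma aCount_eq_countP (t : List (List Int)) (p : List Int) (n y : Nat) :
    aCount t p n y = ((List.range n).countP (fun x => !(x == y) && beatsB t p y x) : Int) := by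
  unfold aCount
  have hstep : ∀ (count : Int) (x : Nat),
      (if x = y then count
       else
        if (t.getD y []).getD x 0 > (t.getD x []).getD y 0 then count + 1
        else if (t.getD y []).getD x 0 = (t.getD x []).getD y 0 then
          (if p.getD y 0 > p.getD x 0 then count + 1 else count)
        else count)
      = (if (!(x == y) && beatsB t p y x) then count + 1 else count) := by
    intro count x
    simp only [beatsB, Bool.and_eq_true, Bool.not_eq_eq_eq_not, Bool.or_eq_true,
      Bool.and_eq_true, decide_eq_true_eq]
    by_cases hxy : x = y
    · simp [hxy]
    · simp only [if_neg hxy]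
      split_ifs <;> simp_all <;> omega
  calc (List.range n).foldl (fun count x =>
        if x = y then count
        else
          if (t.getD y []).getD x 0 > (t.getD x []).getD y 0 then count + 1
          else if (t.getD y []).getD x 0 = (t.getD x []).getD y 0 then
            (if p.getD y 0 > p.getD x 0 then count + 1 else count)
          else count) 0
      = (List.range n).foldl (fun count x =>
          if (!(x == y) && beatsB t p y x) then count + 1 else count) 0 :=
        PySem.List.foldl_congr_mem _ _ _ _ (fun acc x _ => hstep acc x)
    _ = 0 + ((List.range n).countP (fun x => !(x == y) && beatsB t p y x) : Int) :=
        PySem.List.foldl_if_add_one _ _ _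
    _ = _ := by ring

lemma max_if_eq (a c : Int) : (if c > a then c else a) = max a c := by
  rw [max_def]; split_ifs <;> omega

lemma foldl_bFix_length (cnt : PySem.Dict (Nat × Nat) Int) (point : List Int) :
    ∀ (ks : List (Nat × Nat)) (w : List Int),
      (ks.foldl (bFix cnt point) w).length = w.length := by
  intro ks
  induction ks with
  | nil => intro w; rfl
  | cons k ks ih => intro w; rw [List.foldl_cons, ih, bFix_length]

-- ===== VERDICT (by name: the statement is the Claim_ definition above) =====
theorem solution_spec : Claim_equal_solution := by
  intro friends gifts _ hpre
  unfold Spec_solution solution solution_alt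
  dsimp only
  rw [idx_eq friends]
  set n := friends.length with hn
  set idx := friends.zipIdx.foldl (fun d p => d.insert p.1 p.2) PySem.Dict.empty with hidx
  have ht0 : Shape n (List.replicate n (List.replicate n (0 : Int))) :=
    ⟨by simp, fun row h => by rw [List.eq_of_mem_replicate h]; simp⟩
  have hrel0 : ∀ y x, y < n → x < n →
      ((List.replicate n (List.replicate n (0 : Int))).getD y []).getD x 0
        = (PySem.Dict.empty (κ := Nat × Nat) (ν := Int)).getD (y, x) 0 := by
    intro y x hy hx
    rw [PySem.Dict.getD_empty,
      List.getD_eq_getElem (List.replicate n (List.replicate n (0 : Int))) []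
        (by simpa using hy), List.getElem_replicate,
      List.getD_eq_getElem (List.replicate n (0 : Int)) 0 (by simpa using hx),
      List.getElem_replicate]
  obtain ⟨t', cnt', pt, hB, hA, ht', hptl, hnd', hbk', hrel⟩ :=
    fold_both friends n idx (fun k v h => idx_lt friends k v h)
      (fun k hk => idx_mem friends k hk) gifts
      (List.replicate n (List.replicate n (0 : Int))) PySem.Dict.empty
      (List.replicate n (0 : Int)) hpre ht0 (by simp)
      (by simp [PySem.Dict.keys_empty])
      (by intro k hk; simp [PySem.Dict.keys_empty] at hk) hrel0
  rw [hA, hB]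
  dsimp only
  set wins0 := pt.map (fun p => (bSmaller pt).getD p 0) with hw0
  have hw0len : wins0.length = n := by simp [hw0, hptl]
  have hw0getD : ∀ y, y < n → wins0.getD y 0
      = ((List.range n).countP (fun x => decide (pt.getD x 0 < pt.getD y 0)) : Int) := by
    intro y hy
    have hyl : y < pt.length := by omega
    have e1 : wins0.getD y 0 = (bSmaller pt).getD (pt[y]'hyl) 0 := by
      rw [hw0]
      rw [List.getD_eq_getElem (pt.map (fun p => (bSmaller pt).getD p 0)) 0
        (by simpa using hyl)]
      rw [List.getElem_map]
    rw [e1, bSmaller_getD pt _ (List.getElem_mem _)]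
    congr 1
    have hvy : pt[y]'hyl = pt.getD y 0 := (List.getD_eq_getElem _ _ hyl).symm
    rw [hvy]
    set vy := pt.getD y 0 with hvydef
    have hptmap : (List.range n).map (fun x => pt.getD x 0) = pt := by
      apply List.ext_getElem
      · simp [hptl]
      · intro i h1 h2
        simp only [List.getElem_map, List.getElem_range]
        rw [List.getD_eq_getElem _ _ (by simpa [hptl] using h2)]
    conv_lhs => rw [← hptmap]
    rw [List.countP_map]
    rfl
  set wins := cnt'.keys.foldl (bFix cnt' pt) wins0 with hwins
  have hwlen : wins.length = n := by rw [hwins, foldl_bFix_length, hw0len]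
  have hwgetD : ∀ y, y < n → wins.getD y 0 = wins0.getD y 0
      + ((List.range n).map (fun x =>
          if x = y then 0
          else if cnt'.getD (y, x) 0 = cnt'.getD (x, y) 0 then 0
          else (if cnt'.getD (y, x) 0 > cnt'.getD (x, y) 0 then (1 : Int) else 0)
            - (if pt.getD y 0 > pt.getD x 0 then (1 : Int) else 0))).sum := by
    intro y hy
    rw [hwins, foldl_bFix_getD cnt' pt y cnt'.keys wins0
        (fun k hk => by rw [hw0len]; exact hbk' k hk),
      keys_sum_eq_pair_sum cnt' pt n y hnd' hbk',
      pair_sum_eq_range_sum cnt' pt n y hy]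
  have hay : ∀ y, y < n → wins.getD y 0 = aCount t' pt n y := by
    intro y hy
    rw [aCount_eq_countP, hwgetD y hy, hw0getD y hy,
      ← PySem.List.sum_map_ite_one_zero
        (fun x => decide (pt.getD x 0 < pt.getD y 0)) (List.range n),
      ← PySem.List.sum_map_ite_one_zero
        (fun x => !(x == y) && beatsB t' pt y x) (List.range n),
      ← PySem.List.sum_map_add_int]
    apply congrArg List.sum
    apply List.map_congr_left
    intro x hx
    have hxn : x < n := List.mem_range.mp hx
    by_cases hxy : x = y
    · subst hxy
      simp [beatsB]
    · simp only [beatsB, show (x == y) = false from beq_eq_false_iff_ne.mpr hxy,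
        Bool.not_false, Bool.true_and, Bool.or_eq_true, Bool.and_eq_true,
        decide_eq_true_eq]
      rw [hrel y x hy hxn, hrel x y hxn hy, if_neg hxy]
      split_ifs <;> omega
  have hwmap : wins = (List.range n).map (fun y => aCount t' pt n y) := by
    apply List.ext_getElem
    · simp [hwlen]
    · intro y h1 h2
      rw [← List.getD_eq_getElem wins 0 h1]
      simp only [List.getElem_map, List.getElem_range]
      exact hay y (by simpa [hwlen] using h1)
  have hfold : (List.range n).foldl (fun answer y =>
      if aCount t' pt n y > answer then aCount t' pt n y else answer) 0
      = wins.foldl max 0 := by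
    rw [PySem.List.foldl_congr_mem _ _ (fun a y => max a (aCount t' pt n y)) _
      (fun a y _ => max_if_eq a _), hwmap, List.foldl_map]
  rw [hfold]
  clear_value wins
  cases hwc : wins with
  | nil => rfl
  | cons w ws =>
    have h0n : 0 < n := by rw [← hwlen, hwc]; simp
    have hw0' : 0 ≤ w := by
      have hw : w = aCount t' pt n 0 := by
        have h0 := hay 0 h0n
        rw [hwc] at h0
        simpa using h0
      rw [hw, aCount_eq_countP]
      exact Int.natCast_nonneg _
    rw [List.foldl_cons,
      show PySem.List.maxD (w :: ws) (fun x => x) 0 = ws.foldl max w from by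
        rw [PySem.List.maxD, PySem.List.max?_id_cons]; rfl,
      max_eq_right hw0']
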